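-- pv_equiv track=rewrite | github.com/ashishgupta2014/problem_solving_practices | mathmetical/lucky_number_on_given_constrain_power_of_7.py | CheckLuckyNumber
-- ===== SOURCE A (Python) =====
-- def CheckLuckyNumber(number):
--     """
--     https://app.glider.ai/practice/problem/basic-programming/lucky-numbers/problem
--
--
--     John found another manuscript of ancient mathematicians. According to this manuscript an integer k is a
--     lucky number if k = a1​​​​ + a​​​2​​​ + ... + ​a​​​n​​​​,
--     where​​​:
--     ai = 7p. p may be any positive integer.
--     if i and j are distinct, ai != aj
--     :param number:
--     :return:
--     """
--     if number < 7:
--         return 0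
--
--     i = 1
--     temp = 7
--     while pow(7, i) <= number:
--         i += 1
--     if i > 1:
--         temp = pow(7, i-1)
--
--     if number == temp:
--         return 1
--
--
--     diff = number - temp
--     if diff == temp:
--         return 0
--
--     return CheckLuckyNumber(diff)
-- ===== SOURCE B (Python) =====
-- def CheckLuckyNumber(number):
--     # base-7 digit test: number is a sum of DISTINCT positive powers of 7
--     # iff its base-7 digits are all 0/1 and the units digit is 0
--     if number < 7:
--         return 0
--     if number % 7:
--         return 0
--     n = number // 7
--     while n:
--         if n % 7 > 1:
--             return 0
--         n //= 7
--     return 1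
-- ===== Notes on version B (the rewrite author's own statement) =====
-- stated objective: simpler
-- what changed: Replaced greedy recursive subtraction of the largest power of 7 (with a pow-searching while loop per call) by a single direct scan of the base-7 digits: lucky iff the units digit is 0 and every digit is 0 or 1.
-- intended difference: On numbers >= 7 whose lowest nonzero base-7 digit is 1 at a position >= 1 but which also contain a digit >= 2 (e.g. 105 = base-7 '210'), A's greedy subtraction reuses the same power twice and wrongly returns 1, while B returns 0, which is correct since such numbers are not sums of distinct positive powers of 7. — e.g. on CheckLuckyNumber(105): A returns 1, B returns 0
import Mathlib
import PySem

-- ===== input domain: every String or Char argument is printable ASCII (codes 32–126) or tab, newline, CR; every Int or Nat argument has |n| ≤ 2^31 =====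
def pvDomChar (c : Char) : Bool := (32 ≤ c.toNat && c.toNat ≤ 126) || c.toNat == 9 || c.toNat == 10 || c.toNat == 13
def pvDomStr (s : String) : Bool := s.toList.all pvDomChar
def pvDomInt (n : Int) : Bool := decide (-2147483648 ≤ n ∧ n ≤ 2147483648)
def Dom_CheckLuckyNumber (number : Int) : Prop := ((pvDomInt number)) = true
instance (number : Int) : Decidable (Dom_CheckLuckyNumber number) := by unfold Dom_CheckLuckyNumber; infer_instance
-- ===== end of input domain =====

-- B replaces A's greedy recursive subtraction of powers of 7 by a direct base-7 digit scan
-- (simpler); on the D_ inputs below A's greedy answer is wrong and B returns the intended value.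

-- ===== PORT A =====
-- the 'while pow(7,i) <= number: i += 1' loop; fuel only makes it total, number.toNat steps always suffice
def pvFindI (number : Int) (i : Nat) : Nat → Nat
  | 0 => i
  | fuel+1 => if (7:Int)^i ≤ number then pvFindI number (i+1) fuel else i

-- A's recursion, fuel-guarded (each recursive call strictly decreases number, so number.toNat+1 suffices)
def pvGoA : Nat → Int → Int
  | 0, _ => 0
  | fuel+1, number =>
    if number < 7 then 0
    else
      let i := pvFindI number 1 number.toNat
      let temp := if i > 1 then (7:Int)^(i-1) else 7
      if number = temp then 1
      else
        let diff := number - temp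
        if diff = temp then 0 else pvGoA fuel diff

def CheckLuckyNumber (number : Int) : Int := pvGoA (number.toNat + 1) number

-- ===== PORT B =====
-- Source B's 'while n:' digit loop; n is nonnegative there so it is carried as a Nat
-- (fuel only makes it total: n strictly decreases, so n+1 steps always suffice)
def pvDigitsOK : Nat → Nat → Int
  | 0, _ => 1
  | fuel+1, n => if n = 0 then 1 else if n % 7 > 1 then 0 else pvDigitsOK fuel (n / 7)

def CheckLuckyNumber_alt (number : Int) : Int :=
  if number < 7 then 0
  else if PySem.Int.mod number 7 ≠ 0 then 0
  else pvDigitsOK (number.toNat + 1) (number.toNat / 7)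

-- ===== PRECONDITION & SPEC =====
-- base-7 digits of n, least significant first (fuel n+1 always suffices); used only to state D_
def pvDigitList (fuel n : Nat) : List Nat :=
  match fuel with
  | 0 => []
  | f+1 => if n = 0 then [] else n % 7 :: pvDigitList f (n / 7)

def pvDigits (n : Nat) : List Nat := pvDigitList (n + 1) n

-- On numbers ≥ 7 whose lowest nonzero base-7 digit is 1 at a position ≥ 1 but which also contain a
-- digit ≥ 2 (e.g. 105 = base-7 '210'), A's greedy subtraction reuses the same power twice and wrongly
-- returns 1, while B returns 0, which is correct: such numbers are not sums of distinct positive powers of 7.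
def D_CheckLuckyNumber (number : Int) : Prop :=
  7 ≤ number ∧ (pvDigits number.toNat).head? = some 0 ∧
    ((pvDigits number.toNat).dropWhile (· = 0)).head? = some 1 ∧
    ¬ (∀ d ∈ pvDigits number.toNat, d ≤ 1)
instance (number : Int) : Decidable (D_CheckLuckyNumber number) := by
  unfold D_CheckLuckyNumber; infer_instance

def Spec_CheckLuckyNumber (number : Int) (out : Int) : Prop :=
  ¬ D_CheckLuckyNumber number → out = CheckLuckyNumber_alt number
instance (number : Int) (out : Int) : Decidable (Spec_CheckLuckyNumber number out) := by
  unfold Spec_CheckLuckyNumber; infer_instance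

def pvDiffWitness_CheckLuckyNumber : Int := 105
def pvDiffWitnessOut_CheckLuckyNumber : Int × Int := (1, 0)

-- ===== CLAIM (what is proved, stated in full; the proofs are below) =====
def Claim_unchanged_CheckLuckyNumber : Prop :=
  ∀ (number : Int), Dom_CheckLuckyNumber number → Spec_CheckLuckyNumber number (CheckLuckyNumber number)
def Claim_changed_CheckLuckyNumber : Prop :=
  Dom_CheckLuckyNumber (pvDiffWitness_CheckLuckyNumber) ∧ D_CheckLuckyNumber (pvDiffWitness_CheckLuckyNumber) ∧
    CheckLuckyNumber (pvDiffWitness_CheckLuckyNumber) = pvDiffWitnessOut_CheckLuckyNumber.1 ∧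
    CheckLuckyNumber_alt (pvDiffWitness_CheckLuckyNumber) = pvDiffWitnessOut_CheckLuckyNumber.2 ∧
    pvDiffWitnessOut_CheckLuckyNumber.1 ≠ pvDiffWitnessOut_CheckLuckyNumber.2
def Claim_exact_CheckLuckyNumber : Prop :=
  ∀ (number : Int), Dom_CheckLuckyNumber number → D_CheckLuckyNumber number →
    CheckLuckyNumber number ≠ CheckLuckyNumber_alt number

-- ===== LEMMAS AND PROOFS =====

-- lowest nonzero base-7 digit of n (0 if n = 0)
def pvLow (n : Nat) : Nat := (((pvDigits n).dropWhile (· = 0)).head?).getD 0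

lemma pvDigitList_congr : ∀ (f1 f2 n : Nat), n < f1 → n < f2 →
    pvDigitList f1 n = pvDigitList f2 n := by
  intro f1
  induction f1 with
  | zero => intro f2 n h; omega
  | succ f ih =>
    intro f2 n h1 h2
    cases f2 with
    | zero => omega
    | succ g =>
      simp only [pvDigitList]
      by_cases hn : n = 0
      · simp [hn]
      · simp only [hn, if_false]
        have : n / 7 < f := by
          have := Nat.div_lt_self (Nat.pos_of_ne_zero hn) (by norm_num : 1 < 7)
          omega
        have : pvDigitList f (n / 7) = pvDigitList g (n / 7) := by
          apply ih
          · omega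
          · have := Nat.div_lt_self (Nat.pos_of_ne_zero hn) (by norm_num : 1 < 7)
            omega
        rw [this]

lemma pvDigits_zero : pvDigits 0 = [] := by simp [pvDigits, pvDigitList]

lemma pvDigits_cons (n : Nat) (hn : 0 < n) :
    pvDigits n = n % 7 :: pvDigits (n / 7) := by
  unfold pvDigits
  rw [show pvDigitList (n+1) n = if n = 0 then [] else n % 7 :: pvDigitList n (n/7) from rfl]
  have hd : n / 7 < n := Nat.div_lt_self hn (by norm_num)
  simp only [Nat.pos_iff_ne_zero.mp hn, if_false]
  congr 1
  exact pvDigitList_congr n (n/7 + 1) (n/7) hd (Nat.lt_succ_self _)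

lemma pvLow_of_mod_ne (n : Nat) (hn : 0 < n) (h : n % 7 ≠ 0) : pvLow n = n % 7 := by
  unfold pvLow
  rw [pvDigits_cons n hn]
  simp [h]

lemma pvLow_of_mod_eq (n : Nat) (hn : 0 < n) (h : n % 7 = 0) : pvLow n = pvLow (n / 7) := by
  unfold pvLow
  rw [pvDigits_cons n hn]
  simp [h]

lemma pvLow_c_pow (c : Nat) (hc1 : 0 < c) (hc6 : c < 7) : ∀ j, pvLow (c * 7 ^ j) = c := by
  intro j
  induction j with
  | zero =>
    have : c % 7 = c := Nat.mod_eq_of_lt hc6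
    rw [pow_zero, mul_one, pvLow_of_mod_ne c hc1 (by omega), this]
  | succ j ih =>
    have hpos : 0 < c * 7 ^ (j+1) := by positivity
    have hmod : c * 7 ^ (j+1) % 7 = 0 := by
      have : (7:Nat) ∣ c * 7 ^ (j+1) := ⟨c * 7 ^ j, by ring⟩
      omega
    rw [pvLow_of_mod_eq _ hpos hmod]
    have : c * 7 ^ (j+1) / 7 = c * 7 ^ j := by
      rw [show c * 7 ^ (j+1) = c * 7 ^ j * 7 from by ring,
        Nat.mul_div_cancel _ (by norm_num : 0 < 7)]
    rw [this, ih]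

-- subtracting the top power does not change the lowest nonzero digit when a lower nonzero digit exists
lemma pvLow_sub : ∀ (j M : Nat), 7 ^ j ≤ M → M % 7 ^ j ≠ 0 → pvLow (M - 7 ^ j) = pvLow M := by
  intro j
  induction j with
  | zero => intro M _ h; omega
  | succ j ih =>
    intro M hle hmod
    have hp : (7:Nat) ^ (j+1) = 7 * 7 ^ j := by rw [pow_succ]; ring
    have hMpos : 0 < M := by
      have : 0 < 7 ^ (j+1) := by positivity
      omega
    by_cases hm7 : M % 7 = 0
    · obtain ⟨s, hs⟩ := Nat.dvd_of_mod_eq_zero hm7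
      subst hs
      have hsub_pos : 0 < 7 * s - 7 ^ (j+1) := by
        rcases Nat.lt_or_ge (7 * s) (7 ^ (j+1) + 1) with hlt | hge
        · exfalso
          apply hmod
          have heq : 7 * s = 7 ^ (j+1) := by omega
          rw [heq]
          simp
        · omega
      have hsmod : (7 * s - 7 ^ (j+1)) % 7 = 0 := by omega
      rw [pvLow_of_mod_eq _ hMpos hm7, pvLow_of_mod_eq _ hsub_pos hsmod]
      have hdiv : (7 * s - 7 ^ (j+1)) / 7 = s - 7 ^ j := by omega
      have hdiv2 : 7 * s / 7 = s := by omega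
      rw [hdiv, hdiv2]
      apply ih
      · omega
      · intro hc
        obtain ⟨t, ht⟩ := Nat.dvd_of_mod_eq_zero hc
        apply hmod
        have heq : 7 * s = 7 ^ (j+1) * t := by rw [ht, hp]; ring
        rw [heq]
        exact Nat.mul_mod_right _ _
    · have hsm : (M - 7 ^ (j+1)) % 7 = M % 7 := by omega
      have hsub_pos : 0 < M - 7 ^ (j+1) := by
        rcases Nat.eq_or_lt_of_le hle with heq | hlt
        · exfalso; apply hm7; omega
        · omega
      rw [pvLow_of_mod_ne _ hsub_pos (by omega), pvLow_of_mod_ne _ hMpos hm7, hsm]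

lemma pvLow_mem : ∀ n : Nat, 0 < n → pvLow n ∈ pvDigits n := by
  intro n
  induction n using Nat.strong_induction_on with
  | _ n ih =>
    intro hn
    by_cases h7 : n % 7 = 0
    · rw [pvLow_of_mod_eq n hn h7, pvDigits_cons n hn]
      have hq : 0 < n / 7 := by
        rcases Nat.lt_or_ge n 7 with h | h
        · interval_cases n <;> omega
        · exact Nat.div_pos h (by norm_num)
      exact List.mem_cons_of_mem _ (ih (n/7) (Nat.div_lt_self hn (by norm_num)) hq)
    · rw [pvLow_of_mod_ne n hn h7, pvDigits_cons n hn]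
      exact List.mem_cons_self
lemma pvLow_pos : ∀ n : Nat, 0 < n → 0 < pvLow n := by
  intro n
  induction n using Nat.strong_induction_on with
  | _ n ih =>
    intro hn
    by_cases h7 : n % 7 = 0
    · rw [pvLow_of_mod_eq n hn h7]
      apply ih (n/7) (Nat.div_lt_self hn (by norm_num))
      rcases Nat.lt_or_ge n 7 with h | h
      · interval_cases n <;> omega
      · exact Nat.div_pos h (by norm_num)
    · rw [pvLow_of_mod_ne n hn h7]; omega

-- characterisation of pvFindI: it stops at the first exponent whose power exceeds number
lemma pvFindI_stop (fuel i : Nat) (n : Int) (h : ¬ (7:Int)^i ≤ n) : pvFindI n i fuel = i := by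
  cases fuel <;> simp [pvFindI, h]

lemma pvFindI_spec : ∀ (fuel i : Nat) (n : Int), (7:Int)^i ≤ n → n < 7^(i+fuel) →
    (7:Int)^(pvFindI n i fuel - 1) ≤ n ∧ n < 7^(pvFindI n i fuel) ∧ i < pvFindI n i fuel := by
  intro fuel
  induction fuel with
  | zero => intro i n h1 h2; simp at h2; omega
  | succ f ih =>
    intro i n h1 h2
    rw [show pvFindI n i (f+1) = if (7:Int)^i ≤ n then pvFindI n (i+1) f else i from rfl]
    rw [if_pos h1]
    by_cases hnext : (7:Int)^(i+1) ≤ n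
    · have := ih (i+1) n hnext (by rw [show i+1+f = i+(f+1) by omega]; exact h2)
      exact ⟨this.1, this.2.1, by omega⟩
    · rw [pvFindI_stop f (i+1) n hnext]
      refine ⟨by simpa using h1, by omega, by omega⟩

lemma pow7_gt_self (m : Nat) : m < 7 ^ m := Nat.lt_pow_self (by norm_num)

-- the value of A's recursion on every n ≥ 7
lemma A_char : ∀ (n : Nat), 7 ≤ n → ∀ fuel, n < fuel →
    pvGoA fuel (n : Int) = (if n % 7 = 0 then (if pvLow (n / 7) = 1 then 1 else 0) else 0) := by
  intro n
  induction n using Nat.strong_induction_on with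
  | _ n ih =>
    intro hn7 fuel hfuel
    obtain ⟨f, rfl⟩ : ∃ f, fuel = f + 1 := ⟨fuel - 1, by omega⟩
    rw [show pvGoA (f+1) (n:Int) =
      (if (n:Int) < 7 then 0
      else
        let i := pvFindI (n:Int) 1 (n:Int).toNat
        let temp := if i > 1 then (7:Int)^(i-1) else 7
        if (n:Int) = temp then 1
        else
          let diff := (n:Int) - temp
          if diff = temp then 0 else pvGoA f diff) from rfl]
    have hnlt : ¬ ((n:Int) < 7) := by exact_mod_cast not_lt.mpr (by exact_mod_cast hn7)
    rw [if_neg hnlt]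
    -- the pow-search
    have htoNat : ((n:Int)).toNat = n := Int.toNat_natCast n
    have hfspec := pvFindI_spec n 1 (n:Int) (by simpa using (by exact_mod_cast hn7 : (7:Int) ≤ n))
      (by
        have h1 : (n:Int) < (7:Int)^n := by exact_mod_cast pow7_gt_self n
        calc (n:Int) < (7:Int)^n := h1
          _ ≤ (7:Int)^(1+n) := pow_le_pow_right₀ (by norm_num) (by omega))
    rw [htoNat]
    set j := pvFindI (n:Int) 1 n with hj
    obtain ⟨hjle, hjlt, hj1⟩ := hfspec
    have htemp : (if j > 1 then (7:Int)^(j-1) else 7) = 7^(j-1) := if_pos hj1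
    simp only [htemp]
    obtain ⟨K, hjK⟩ : ∃ K, j - 1 = K + 1 := ⟨j - 2, by omega⟩
    have hj2 : j = K + 2 := by omega
    rw [hjK] at hjle ⊢
    rw [hj2] at hjlt
    -- bounds on the Nat side: 7^(K+1) ≤ n < 7^(K+2)
    have hkle : 7 ^ (K+1) ≤ n := by exact_mod_cast hjle
    have hklt : n < 7 ^ (K+2) := by exact_mod_cast hjlt
    have hpowcast : (((7:Nat) ^ (K+1) : Nat) : Int) = (7:Int)^(K+1) := by push_cast; ring
    have h7k : (7:Nat) ∣ 7 ^ (K+1) := dvd_pow_self 7 (by omega)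
    have hmul : (7:Nat) * 7 ^ K = 7 ^ (K+1) := by rw [pow_succ]; ring
    by_cases hcase1 : (n:Int) = (7:Int)^(K+1)
    · -- n = 7^(K+1) : A returns 1
      rw [if_pos hcase1]
      have hnk : n = 7 ^ (K+1) := by rw [← hpowcast] at hcase1; exact_mod_cast hcase1
      have hmod : n % 7 = 0 := by obtain ⟨t, ht⟩ := h7k; rw [hnk]; omega
      rw [if_pos hmod]
      have hdiv : n / 7 = 7 ^ K := by
        rw [hnk, pow_succ, Nat.mul_div_cancel _ (by norm_num : 0 < 7)]
      have hl := pvLow_c_pow 1 (by norm_num) (by norm_num) K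
      rw [one_mul] at hl
      rw [hdiv, hl]
      norm_num
    · rw [if_neg hcase1]
      by_cases hcase2 : (n:Int) - (7:Int)^(K+1) = (7:Int)^(K+1)
      · -- n = 2·7^(K+1) : A returns 0
        rw [if_pos hcase2]
        have hnk : n = 2 * 7 ^ (K+1) := by
          have h2 : (n:Int) = 2 * (7:Int)^(K+1) := by linarith
          rw [← hpowcast] at h2; exact_mod_cast h2
        have hmod : n % 7 = 0 := by obtain ⟨t, ht⟩ := h7k; rw [hnk]; omega
        rw [if_pos hmod]
        have hdiv : n / 7 = 2 * 7 ^ K := by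
          rw [hnk, pow_succ, ← mul_assoc, Nat.mul_div_cancel _ (by norm_num : 0 < 7)]
        rw [hdiv, pvLow_c_pow 2 (by norm_num) (by norm_num) K]
        norm_num
      · rw [if_neg hcase2]
        -- recursive call on d = n - 7^(K+1)
        have hne : n ≠ 7 ^ (K+1) := by
          intro h; apply hcase1; rw [← hpowcast]; exact_mod_cast h
        set d := n - 7 ^ (K+1) with hd
        have hdpos : 1 ≤ d := by omega
        have hcast : (n:Int) - (7:Int)^(K+1) = (d:Int) := by
          rw [← hpowcast, hd, Nat.cast_sub hkle]
        rw [hcast]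
        have hdmod : d % 7 = n % 7 := by
          obtain ⟨t, ht⟩ := h7k
          have hx : d + 7 * t = n := by omega
          omega
        by_cases hdsmall : d < 7
        · -- remainder below 7 : A returns 0, and n % 7 = d ≠ 0
          obtain ⟨g, rfl⟩ : ∃ g, f = g + 1 := ⟨f - 1, by omega⟩
          rw [show pvGoA (g+1) (d:Int) = if (d:Int) < 7 then 0 else _ from rfl,
            if_pos (by exact_mod_cast hdsmall)]
          have hz : n % 7 ≠ 0 := by
            rw [← hdmod, Nat.mod_eq_of_lt hdsmall]; omega
          rw [if_neg hz]
        · -- d ≥ 7 : use the induction hypothesis and digit stability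
          have hdn : d < n := by
            have : 7 ≤ 7 ^ (K+1) := Nat.le_self_pow (by omega) 7
            omega
          rw [ih d hdn (by omega) f (by omega), hdmod]
          by_cases hmod : n % 7 = 0
          · rw [if_pos hmod, if_pos hmod]
            -- compare pvLow (d/7) with pvLow (n/7)
            obtain ⟨s, hs⟩ := Nat.dvd_of_mod_eq_zero hmod
            have hM7 : n / 7 = s := by rw [hs]; exact Nat.mul_div_cancel_left _ (by norm_num)
            have hd7 : d / 7 = s - 7 ^ K := by
              have h1 : d = 7 * (s - 7 ^ K) := by
                rw [hd, hs, ← hmul, Nat.mul_sub]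
              rw [h1, Nat.mul_div_cancel_left _ (by norm_num : 0 < 7)]
            have hsle : 7 ^ K ≤ s := by
              have hx : 7 * 7 ^ K ≤ 7 * s := by rw [← hs, hmul]; exact hkle
              omega
            have hslt : s < 7 ^ (K+1) := by
              have hx : 7 * s < 7 * 7 ^ (K+1) := by
                rw [← hs, show (7:Nat) * 7 ^ (K+1) = 7 ^ (K+2) by rw [pow_succ]; ring]
                exact hklt
              omega
            rw [hM7, hd7]
            by_cases hsm : s % 7 ^ K = 0
            · -- the quotient is c·7^K with 3 ≤ c ≤ 6 : both sides are 0
              obtain ⟨c, hc⟩ := Nat.dvd_of_mod_eq_zero hsm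
              have hs2 : s = c * 7 ^ K := by rw [hc]; ring
              have hpow : 0 < (7:Nat) ^ K := by positivity
              have hc1 : 1 ≤ c := by
                rcases Nat.eq_zero_or_pos c with h | h
                · rw [h, zero_mul] at hs2; omega
                · exact h
              have hc7 : c < 7 := by
                by_contra h
                have hx : 7 * 7 ^ K ≤ c * 7 ^ K := Nat.mul_le_mul_right _ (by omega)
                rw [hmul, ← hs2] at hx
                omega
              have hcne1 : c ≠ 1 := by
                intro h
                apply hne
                rw [hs, hs2, h, one_mul, hmul]
              have hcne2 : c ≠ 2 := by
                intro h
                apply hcase2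
                rw [hcast, ← hpowcast]
                have hn2 : d = 7 ^ (K+1) := by
                  have hx : n = 2 * 7 ^ (K+1) := by rw [hs, hs2, h, ← hmul]; ring
                  omega
                exact_mod_cast hn2
              have hs3 : s - 7 ^ K = (c-1) * 7 ^ K := by
                rw [hs2, Nat.sub_mul, one_mul]
              rw [hs3, hs2, pvLow_c_pow (c-1) (by omega) (by omega) K,
                pvLow_c_pow c (by omega) hc7 K]
              rw [if_neg (by omega : ¬ (c - 1 = 1)), if_neg hcne1]
            · -- a lower nonzero digit exists : pvLow is unchanged
              rw [pvLow_sub K s hsle hsm]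
          · rw [if_neg hmod, if_neg hmod]

-- the value of B's digit loop
lemma B_char : ∀ (m : Nat), ∀ fuel, m < fuel →
    pvDigitsOK fuel m = (if ∀ d ∈ pvDigits m, d ≤ 1 then 1 else 0) := by
  intro m
  induction m using Nat.strong_induction_on with
  | _ m ih =>
    intro fuel hfuel
    obtain ⟨f, rfl⟩ : ∃ f, fuel = f + 1 := ⟨fuel - 1, by omega⟩
    rw [show pvDigitsOK (f+1) m =
      (if m = 0 then 1 else if m % 7 > 1 then 0 else pvDigitsOK f (m / 7)) from rfl]
    by_cases hm : m = 0
    · subst hm; simp [pvDigits_zero]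
    · rw [if_neg hm]
      have hmpos : 0 < m := Nat.pos_of_ne_zero hm
      rw [pvDigits_cons m hmpos]
      by_cases hbig : m % 7 > 1
      · rw [if_pos hbig, if_neg (by push_neg; exact ⟨m % 7, List.mem_cons_self, by omega⟩)]
      · rw [if_neg hbig]
        have hdiv : m / 7 < m := Nat.div_lt_self hmpos (by norm_num)
        rw [ih (m/7) hdiv f (by omega)]
        by_cases hall : ∀ d ∈ pvDigits (m/7), d ≤ 1
        · rw [if_pos hall, if_pos (by
            intro d hd
            rcases List.mem_cons.mp hd with h | h
            · omega
            · exact hall d h)]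
        · rw [if_neg hall, if_neg (by
            intro h
            exact hall (fun d hd => h d (List.mem_cons_of_mem _ hd)))]

lemma A_val (n : Int) (h : 7 ≤ n) :
    CheckLuckyNumber n =
      (if n.toNat % 7 = 0 then (if pvLow (n.toNat / 7) = 1 then 1 else 0) else 0) := by
  have hcast : ((n.toNat : Int)) = n := Int.toNat_of_nonneg (by omega)
  have hch := A_char n.toNat (by omega) (n.toNat + 1) (by omega)
  rw [hcast] at hch
  unfold CheckLuckyNumber
  exact hch

lemma B_val (n : Int) (h : 7 ≤ n) (hmod : n.toNat % 7 = 0) :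
    CheckLuckyNumber_alt n = pvDigitsOK (n.toNat + 1) (n.toNat / 7) := by
  unfold CheckLuckyNumber_alt
  rw [if_neg (by omega)]
  have hmodi : PySem.Int.mod n 7 = 0 := by
    rw [PySem.Int.mod_eq_emod_of_pos (by norm_num)]
    omega
  rw [if_neg (fun hc => hc hmodi)]

lemma B_val_ne (n : Int) (h : 7 ≤ n) (hmod : n.toNat % 7 ≠ 0) :
    CheckLuckyNumber_alt n = 0 := by
  unfold CheckLuckyNumber_alt
  rw [if_neg (by omega)]
  have hmodi : PySem.Int.mod n 7 ≠ 0 := by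
    rw [PySem.Int.mod_eq_emod_of_pos (by norm_num)]
    omega
  rw [if_pos hmodi]

lemma low_quot (m : Nat) (hm : 7 ≤ m) (hmod : m % 7 = 0) : pvLow m = pvLow (m / 7) :=
  pvLow_of_mod_eq m (by omega) hmod

lemma digits_head (m : Nat) (hm : 0 < m) : (pvDigits m).head? = some (m % 7) := by
  rw [pvDigits_cons m hm]; rfl

lemma low_head (m : Nat) (hm : 0 < m) :
    ((pvDigits m).dropWhile (· = 0)).head? = some (pvLow m) := by
  induction m using Nat.strong_induction_on with
  | _ m ih =>
    by_cases h7 : m % 7 = 0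
    · rw [pvDigits_cons m hm, pvLow_of_mod_eq m hm h7]
      have hq : 0 < m / 7 := by
        rcases Nat.lt_or_ge m 7 with h | h
        · interval_cases m <;> omega
        · exact Nat.div_pos h (by norm_num)
      rw [List.dropWhile_cons]
      simp only [h7, decide_true, if_true]
      exact ih (m/7) (Nat.div_lt_self hm (by norm_num)) hq
    · rw [pvDigits_cons m hm, pvLow_of_mod_ne m hm h7, List.dropWhile_cons]
      simp [h7]

-- ===== VERDICT (by name: the statement is the Claim_ definition above) =====
theorem CheckLuckyNumber_spec : Claim_unchanged_CheckLuckyNumber := by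
  unfold Claim_unchanged_CheckLuckyNumber
  intro n _ hnd
  by_cases h7 : n < 7
  · -- both return 0 immediately
    rw [show CheckLuckyNumber n = pvGoA (n.toNat + 1) n from rfl,
      show pvGoA (n.toNat + 1) n = if n < 7 then 0 else _ from rfl, if_pos h7]
    unfold CheckLuckyNumber_alt
    rw [if_pos h7]
  · replace h7 : 7 ≤ n := by omega
    have hm7 : 7 ≤ n.toNat := by omega
    have hmpos : 0 < n.toNat := by omega
    rw [A_val n h7]
    by_cases hmod : n.toNat % 7 = 0
    · rw [if_pos hmod, B_val n h7 hmod,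
        B_char (n.toNat / 7) (n.toNat + 1) (by omega)]
      have hq : 0 < n.toNat / 7 := Nat.div_pos hm7 (by norm_num)
      by_cases hlow : pvLow (n.toNat / 7) = 1
      · rw [if_pos hlow]
        -- A says 1; outside D_ all digits must be ≤ 1, so B says 1 too
        by_cases hall : ∀ d ∈ pvDigits (n.toNat / 7), d ≤ 1
        · rw [if_pos hall]
        · exfalso
          apply hnd
          refine ⟨h7, ?_, ?_, ?_⟩
          · rw [digits_head n.toNat hmpos, hmod]
          · rw [low_head n.toNat hmpos, low_quot n.toNat hm7 hmod, hlow]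
          · intro h
            apply hall
            intro d hd
            apply h
            rw [pvDigits_cons n.toNat hmpos]
            exact List.mem_cons_of_mem _ hd
      · rw [if_neg hlow]
        -- lowest nonzero digit is ≥ 2, so B finds a digit > 1
        rw [if_neg (by
          intro hall
          have hmem := pvLow_mem (n.toNat / 7) hq
          have hpos := pvLow_pos (n.toNat / 7) hq
          have := hall _ hmem
          omega)]
    · rw [if_neg hmod, B_val_ne n h7 hmod]

theorem CheckLuckyNumber_changed : Claim_changed_CheckLuckyNumber := by
  unfold Claim_changed_CheckLuckyNumber; decide

theorem CheckLuckyNumber_tight : Claim_exact_CheckLuckyNumber := by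
  unfold Claim_exact_CheckLuckyNumber
  intro n _ hd
  obtain ⟨h7, hhead, hlow, hnot⟩ := hd
  have hmpos : 0 < n.toNat := by omega
  have hm7 : 7 ≤ n.toNat := by omega
  have hmod : n.toNat % 7 = 0 := by
    rw [digits_head n.toNat hmpos] at hhead
    exact Option.some.inj hhead
  have hlow1 : pvLow (n.toNat / 7) = 1 := by
    rw [low_head n.toNat hmpos] at hlow
    rw [← low_quot n.toNat hm7 hmod]
    exact Option.some.inj hlow
  rw [A_val n h7, if_pos hmod, if_pos hlow1, B_val n h7 hmod,
    B_char (n.toNat / 7) (n.toNat + 1) (by omega)]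
  have hall : ¬ ∀ d ∈ pvDigits (n.toNat / 7), d ≤ 1 := by
    intro h
    apply hnot
    intro d hd'
    rw [pvDigits_cons n.toNat hmpos] at hd'
    rcases List.mem_cons.mp hd' with h0 | h0
    · omega
    · exact h d h0
  rw [if_neg hall]
  norm_num
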